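-- pv_equiv track=rewrite | github.com/MarkSun04HX/372-prediction-competition | legacy/python/src/meps_harmonize.py | harmonize_column_mapping
-- ===== SOURCE A (Python) =====
-- from collections import Counter
--
-- def harmonize_name(column: str, yy: str) -> str:
--     """If *column* ends with two-digit *yy* for that file year, strip it; else unchanged."""
--     if len(column) > len(yy) and column.endswith(yy):
--         return column[: -len(yy)]
--     return column
--
-- def harmonize_column_mapping(columns: list[str], yy: str) -> dict[str, str]:
--     """
--     Build rename dict old -> new. Raises if harmonization maps two originals to the same new name
--     (unexpected in MEPS FYC files).
--     """
--     mapping = {c: harmonize_name(c, yy) for c in columns}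
--     targets = list(mapping.values())
--     counts = Counter(targets)
--     collisions = [name for name, k in counts.items() if k > 1]
--     if collisions:
--         # show which originals collide
--         sample = collisions[:5]
--         detail = {t: [k for k, v in mapping.items() if v == t] for t in sample}
--         raise ValueError(f"Harmonization collisions for yy={yy}: {detail}")
--     return mapping
-- ===== SOURCE B (Python) =====
-- def harmonize_name(column: str, yy: str) -> str:
--     """If *column* ends with two-digit *yy* for that file year, strip it; else unchanged."""
--     if len(column) > len(yy) and column.endswith(yy):
--         return column[: -len(yy)]
--     return column
--
-- def harmonize_column_mapping(columns, yy):
--     """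
--     Sort-based collision detection: dedup the columns, sort the (new, old) pairs by
--     new name (stable), and scan adjacent runs; any run longer than 1 is a collision
--     group read straight off the sorted order. No Counter, no hash-based grouping.
--     """
--     uniq = list(dict.fromkeys(columns))
--     pairs = sorted(((harmonize_name(c, yy), c) for c in uniq), key=lambda p: p[0])
--     groups = []
--     run = []
--     for p in pairs:
--         if run and run[0][0] != p[0]:
--             if len(run) > 1:
--                 groups.append((run[0][0], [c for _, c in run]))
--             run = []
--         run.append(p)
--     if len(run) > 1:
--         groups.append((run[0][0], [c for _, c in run]))
--     if groups:
--         raise ValueError(f"Harmonization collisions for yy={yy}: {dict(groups[:5])}")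
--     return {c: harmonize_name(c, yy) for c in uniq}
-- ===== Notes on version B (the rewrite author's own statement) =====
-- stated objective: alternative
-- what changed: Collision detection is done by sorting the deduplicated (new,old) pairs by new name and scanning adjacent runs, instead of A's Counter over the mapping's values plus an error-path re-scan of the dict.
import Mathlib
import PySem

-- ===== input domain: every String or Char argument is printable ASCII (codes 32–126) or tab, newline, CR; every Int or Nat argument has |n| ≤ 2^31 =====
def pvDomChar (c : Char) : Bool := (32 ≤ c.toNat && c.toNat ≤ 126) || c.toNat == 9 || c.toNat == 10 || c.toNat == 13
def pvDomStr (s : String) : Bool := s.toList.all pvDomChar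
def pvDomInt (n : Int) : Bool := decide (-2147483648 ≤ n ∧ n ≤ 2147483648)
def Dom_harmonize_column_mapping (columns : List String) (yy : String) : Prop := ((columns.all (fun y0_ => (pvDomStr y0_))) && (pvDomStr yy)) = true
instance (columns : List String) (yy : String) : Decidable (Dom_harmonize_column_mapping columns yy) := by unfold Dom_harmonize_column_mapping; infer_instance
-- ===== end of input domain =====

-- B replaces A's Counter-over-values collision check (plus error-path re-scan of the mapping)
-- by sort-based duplicate detection: dedup the columns, sort the (new, old) pairs by new name
-- and scan adjacent runs (objective: alternative).


-- ===== PORT A =====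
-- shared module helper harmonize_name (used verbatim by both A and B in Python)
def harmonizeName (column : String) (yy : String) : String :=
  if (decide (PySem.Str.len column > PySem.Str.len yy) && PySem.Str.endswith column yy) = true then
    PySem.Str.slice column none (some (-(PySem.Str.len yy)))   -- column[: -len(yy)]
  else column

def harmonize_column_mapping (columns : List String) (yy : String) : List (String × String) :=
  let mapping : PySem.Dict String String :=
    columns.foldl (fun d c => d.insert c (harmonizeName c yy)) PySem.Dict.empty
  let targets := mapping.values
  let counts := PySem.Dict.counter targets
  let collisions := (counts.items.filter (fun p => decide (p.2 > 1))).map (fun p => p.1)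
  if collisions.isEmpty then mapping.items
  else []   -- Python raises ValueError here; these inputs are excluded by Pre_

-- ===== PORT B =====
-- one step of B's run scan: 'if run and run[0][0] != p[0]: (flush; run=[]); run.append(p)'
def pvScanStep (st : List (String × List String) × List (String × String))
    (p : String × String) : List (String × List String) × List (String × String) :=
  match st.2 with
  | [] => (st.1, [p])
  | q :: _ =>
    if q.1 ≠ p.1 then
      ((if st.2.length > 1 then st.1 ++ [(q.1, st.2.map Prod.snd)] else st.1), [p])
    else (st.1, st.2 ++ [p])

def harmonize_column_mapping_alt (columns : List String) (yy : String) : List (String × String) :=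
  let uniq := PySem.List.dedup columns                      -- list(dict.fromkeys(columns))
  let pairs := PySem.List.sorted (uniq.map (fun c => (harmonizeName c yy, c))) (fun p => p.1) false
  let st := pairs.foldl pvScanStep ([], [])
  let groups :=                                             -- final flush after the loop
    if st.2.length > 1 then st.1 ++ [((st.2.headD ("", "")).1, st.2.map Prod.snd)] else st.1
  if groups.isEmpty then
    (uniq.foldl (fun d c => d.insert c (harmonizeName c yy)) PySem.Dict.empty).items
  else []   -- Python raises ValueError here; these inputs are excluded by Pre_

-- ===== PRECONDITION & SPEC =====
-- Pre_ excludes exactly the inputs on which Python A raises ValueError: two distinct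
-- column names harmonizing to the same new name (B raises there too).
def Pre_harmonize_column_mapping (columns : List String) (yy : String) : Prop :=
  ((PySem.Set.ofList columns).map (fun c => harmonizeName c yy)).Nodup
instance (columns : List String) (yy : String) : Decidable (Pre_harmonize_column_mapping columns yy) := by unfold Pre_harmonize_column_mapping; infer_instance

def pvWitness_harmonize_column_mapping : List String × String := (["AGE23X", "SEX"], "23")

def Spec_harmonize_column_mapping (columns : List String) (yy : String) (out : List (String × String)) : Prop := out = harmonize_column_mapping_alt columns yy
instance (columns : List String) (yy : String) (out : List (String × String)) : Decidable (Spec_harmonize_column_mapping columns yy out) := by unfold Spec_harmonize_column_mapping; infer_instance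

-- ===== CLAIM (what is proved, stated in full; the proofs are below) =====
def Claim_equal_harmonize_column_mapping : Prop := ∀ (columns : List String) (yy : String), Dom_harmonize_column_mapping columns yy → Pre_harmonize_column_mapping columns yy → Spec_harmonize_column_mapping columns yy (harmonize_column_mapping columns yy)

-- ===== LEMMAS AND PROOFS =====

-- contains of the canonical dict "keys S, values by f"
lemma contains_mk_map {β : Type} (f : String → β) (S : List String) (c : String) :
    (PySem.Dict.mk (S.map (fun k => (k, f k)))).contains c = decide (c ∈ S) := by
  rw [PySem.Dict.contains_mk, List.any_map]
  show (S.any fun k => k == c) = _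
  simp [List.any_beq']

lemma set_add_of_mem {S : List String} {c : String} (h : c ∈ S) : PySem.Set.add S c = S := by
  simp [PySem.Set.add, PySem.Set.contains, h]

lemma set_add_of_not_mem {S : List String} {c : String} (h : c ∉ S) : PySem.Set.add S c = S ++ [c] := by
  simp [PySem.Set.add, PySem.Set.contains, h]

-- a foldl of inserts builds the canonical first-occurrence dict
lemma fold_insert_eq {β : Type} (f : String → β) (cols : List String) (S : List String) :
    cols.foldl (fun d c => d.insert c (f c))
      (PySem.Dict.mk (S.map (fun c => (c, f c))))
    = PySem.Dict.mk ((PySem.Set.update S cols).map (fun c => (c, f c))) := by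
  induction cols generalizing S with
  | nil => rfl
  | cons c cols ih =>
    rw [List.foldl_cons]
    show cols.foldl _ ((PySem.Dict.mk (S.map (fun c => (c, f c)))).insert c (f c))
        = PySem.Dict.mk ((PySem.Set.update (PySem.Set.add S c) cols).map (fun c => (c, f c)))
    by_cases hc : c ∈ S
    · rw [set_add_of_mem hc, ← ih S]
      congr 1
      apply PySem.Dict.ext
      rw [PySem.Dict.items_insert_of_contains _ _ (by rw [contains_mk_map]; simpa)]
      show List.map _ (S.map (fun c => (c, f c))) = _
      rw [List.map_map]
      apply List.map_congr_left
      intro a _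
      by_cases hac : a = c <;> simp [hac]
    · rw [set_add_of_not_mem hc, ← ih (S ++ [c])]
      congr 1
      apply PySem.Dict.ext
      rw [PySem.Dict.items_insert_of_not_contains _ _ (by rw [contains_mk_map]; simpa)]
      show (S.map (fun c => (c, f c))) ++ _ = _
      simp

-- Set.update from the empty set of an already-duplicate-free list is the list itself
lemma set_update_of_nodup (l : List String) (S : List String)
    (hl : l.Nodup) (hd : ∀ x ∈ l, x ∉ S) : PySem.Set.update S l = S ++ l := by
  induction l generalizing S with
  | nil => simp [PySem.Set.update]
  | cons c l ih =>
    show PySem.Set.update (PySem.Set.add S c) l = _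
    rw [set_add_of_not_mem (hd c (by simp))]
    rw [ih (S ++ [c]) hl.of_cons]
    · simp
    · intro x hx
      simp only [List.mem_append, List.mem_singleton]
      rintro (h | rfl)
      · exact hd x (by simp [hx]) h
      · exact (List.nodup_cons.mp hl).1 hx

-- B's run scan never produces a group when the sorted new names are duplicate-free
lemma scan_no_group (l : List (String × String)) (g : List (String × List String))
    (run : List (String × String))
    (hl : (l.map Prod.fst).Nodup)
    (hrun : run = [] ∨ ∃ q, run = [q] ∧ q.1 ∉ l.map Prod.fst) :
    ∃ run', l.foldl pvScanStep (g, run) = (g, run') ∧ run'.length ≤ 1 := by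
  induction l generalizing g run with
  | nil =>
    refine ⟨run, rfl, ?_⟩
    rcases hrun with rfl | ⟨q, rfl, _⟩ <;> simp
  | cons p l ih =>
    rw [List.foldl_cons]
    have hstep : pvScanStep (g, run) p = (g, [p]) := by
      rcases hrun with rfl | ⟨q, rfl, hq⟩
      · rfl
      · have hne : q.1 ≠ p.1 := by
          intro h; exact hq (by simp [h])
        simp [pvScanStep, hne]
    rw [hstep]
    refine ih g [p] (List.nodup_cons.mp hl).2 (Or.inr ⟨p, rfl, ?_⟩)
    exact (List.nodup_cons.mp hl).1

-- ===== VERDICT (by name: the statement is the Claim_ definition above) =====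
theorem harmonize_column_mapping_spec : Claim_equal_harmonize_column_mapping := by
  intro columns yy _hdom hpre
  unfold Spec_harmonize_column_mapping
  have hof : PySem.Set.ofList columns = PySem.Set.update ([] : List String) columns := by
    rw [PySem.Set.ofList_eq_foldl]; rfl
  set U := PySem.Set.ofList columns with hU
  have hUnd : U.Nodup := PySem.Set.nodup_ofList columns
  have hpre' : (U.map (fun c => harmonizeName c yy)).Nodup := hpre
  simp only [harmonize_column_mapping, harmonize_column_mapping_alt]
  -- A's dict comprehension
  have hemp : (PySem.Dict.empty : PySem.Dict String String)
      = PySem.Dict.mk (([] : List String).map (fun c => (c, harmonizeName c yy))) := rfl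
  rw [hemp, fold_insert_eq (fun c => harmonizeName c yy) columns [], ← hof]
  -- A's collision list is empty under Pre_
  have htargets : (PySem.Dict.mk (U.map (fun c => (c, harmonizeName c yy)))).values
      = U.map (fun c => harmonizeName c yy) := by
    rw [PySem.Dict.values_mk, List.map_map]; rfl
  have hcolA : ((PySem.Dict.counter (U.map (fun c => harmonizeName c yy))).items.filter
      (fun p => decide (p.2 > 1))) = [] := by
    rw [PySem.Dict.items_counter, List.filter_eq_nil_iff]
    rintro ⟨k, n⟩ hk
    simp only [List.mem_map] at hk
    obtain ⟨t, ht, hkt⟩ := hk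
    have htmem : t ∈ U.map (fun c => harmonizeName c yy) := (PySem.Set.mem_ofList _ _).mp ht
    have hcount := List.count_eq_one_of_mem hpre' htmem
    have hn : n = ((1 : Nat) : Int) := by rw [← hcount]; exact (congrArg Prod.snd hkt).symm
    simp [hn]
  -- B's uniq and its dict comprehension
  have huniq : PySem.List.dedup columns = U := by
    rw [PySem.List.dedup_eq_ofList]
  -- B's sorted pairs have duplicate-free first components
  have hperm : (PySem.List.sorted (U.map (fun c => (harmonizeName c yy, c)))
      (fun p => p.1) false).Perm (U.map (fun c => (harmonizeName c yy, c))) :=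
    PySem.List.sorted_perm _ _ _
  have hfstnd : ((PySem.List.sorted (U.map (fun c => (harmonizeName c yy, c)))
      (fun p => p.1) false).map Prod.fst).Nodup := by
    refine (List.Perm.nodup_iff (List.Perm.map Prod.fst hperm)).mpr ?_
    rw [List.map_map]
    exact hpre'
  obtain ⟨run', hscan, hlen⟩ := scan_no_group
    (PySem.List.sorted (U.map (fun c => (harmonizeName c yy, c))) (fun p => p.1) false)
    [] [] hfstnd (Or.inl rfl)
  rw [huniq, hscan, fold_insert_eq (fun c => harmonizeName c yy) U [],
    set_update_of_nodup U [] hUnd (by simp), List.nil_append]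
  rw [htargets, hcolA]
  have hflush : ¬ run'.length > 1 := by omega
  simp [hflush]
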